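-- pv_equiv track=rewrite | github.com/ufkapano/graphtheory | graphtheory/chordality/intervaltools.py | make_2tree_interval
-- ===== SOURCE A (Python) =====
-- def swap(L, i, j):
--     L[i], L[j] = L[j], L[i]
--
-- def make_2tree_interval(n):   # tak jak dla circle graphs
--     """Return a 2tree interval graph as double perm."""
--     if n < 2:
--         raise ValueError("n has to be greater than 1")
--     perm = [0, 1, 0, 1]
--     for i in range(2, n):
--         perm.extend((i, i))
--         swap(perm, -3, -2)
--         swap(perm, -4, -3)
--     return perm
-- ===== SOURCE B (Python) =====
-- def make_2tree_interval(n):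
--     """Return a 2tree interval graph as double perm."""
--     if n < 2:
--         raise ValueError("n has to be greater than 1")
--
--     def val(j):
--         if j == 0:
--             return 0
--         if j == 1:
--             return 1
--         if j == 2 * n - 2:
--             return n - 2
--         if j == 2 * n - 1:
--             return n - 1
--         return j // 2 + 1 if j % 2 == 0 else (j - 3) // 2
--
--     return [val(j) for j in range(2 * n)]
-- ===== Notes on version B (the rewrite author's own statement) =====
-- stated objective: alternative
-- what changed: B computes each of the 2n output slots directly from a closed-form per-index formula (first/second occurrence positions) instead of growing the list pairwise and repairing the tail with two swaps per step.
import Mathlib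
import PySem

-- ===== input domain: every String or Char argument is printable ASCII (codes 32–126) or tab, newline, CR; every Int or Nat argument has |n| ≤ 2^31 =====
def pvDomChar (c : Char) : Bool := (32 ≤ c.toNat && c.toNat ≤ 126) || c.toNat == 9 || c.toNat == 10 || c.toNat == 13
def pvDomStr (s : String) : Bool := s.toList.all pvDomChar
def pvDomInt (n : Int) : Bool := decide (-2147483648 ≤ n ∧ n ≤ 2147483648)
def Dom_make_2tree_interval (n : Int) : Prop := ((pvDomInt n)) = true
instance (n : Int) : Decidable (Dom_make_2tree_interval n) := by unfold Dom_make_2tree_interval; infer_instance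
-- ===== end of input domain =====

-- B replaces A's grow-and-swap loop by a closed-form per-index fill of the 2n slots (alternative decomposition, same O(n) cost).

-- ===== PORT A =====
-- swap(L, i, j): L[i], L[j] = L[j], L[i]  (indices always in range at A's call sites)
def pvSwap (L : List Int) (i j : Int) : List Int :=
  PySem.List.pySetD (PySem.List.pySetD L i (PySem.List.pyGetD L j 0)) j (PySem.List.pyGetD L i 0)

def pvStep (perm : List Int) (i : Int) : List Int :=
  pvSwap (pvSwap (perm ++ [i, i]) (-3) (-2)) (-4) (-3)

def make_2tree_interval (n : Int) : List Int :=
  if n < 2 then []  -- Python raises ValueError here; excluded by Pre_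
  else (PySem.List.pyRange 2 n 1).foldl pvStep [0, 1, 0, 1]

-- ===== PORT B =====
def pvVal (n j : Int) : Int :=
  if j = 0 then 0
  else if j = 1 then 1
  else if j = 2 * n - 2 then n - 2
  else if j = 2 * n - 1 then n - 1
  else if PySem.Int.mod j 2 = 0 then PySem.Int.floordiv j 2 + 1
  else PySem.Int.floordiv (j - 3) 2

def make_2tree_interval_alt (n : Int) : List Int :=
  if n < 2 then []  -- Python raises ValueError here; excluded by Pre_
  else (PySem.List.pyRange 0 (2 * n) 1).map (pvVal n)

-- ===== PRECONDITION & SPEC =====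
-- Pre_ excludes exactly the inputs on which the Python raises ValueError (n below the minimum size).
def Pre_make_2tree_interval (n : Int) : Prop := 2 ≤ n
instance (n : Int) : Decidable (Pre_make_2tree_interval n) := by unfold Pre_make_2tree_interval; infer_instance
def pvWitness_make_2tree_interval : Int := (3)

def Spec_make_2tree_interval (n : Int) (out : List Int) : Prop := out = make_2tree_interval_alt n
instance (n : Int) (out : List Int) : Decidable (Spec_make_2tree_interval n out) := by unfold Spec_make_2tree_interval; infer_instance

-- ===== CLAIM (what is proved, stated in full; the proofs are below) =====
def Claim_equal_make_2tree_interval : Prop := ∀ (n : Int), Dom_make_2tree_interval n → Pre_make_2tree_interval n → Spec_make_2tree_interval n (make_2tree_interval n)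

-- ===== LEMMAS AND PROOFS =====

-- the n-independent middle formula of pvVal
def pvCore (j : Int) : Int :=
  if j = 0 then 0
  else if j = 1 then 1
  else if PySem.Int.mod j 2 = 0 then PySem.Int.floordiv j 2 + 1
  else PySem.Int.floordiv (j - 3) 2

theorem pvIdx?_neg (n : Nat) (i : Int) (h1 : i < 0) (h2 : -(n:Int) ≤ i) :
    PySem.List.pyIdx? n i = some (n - (-i).toNat) := by
  unfold PySem.List.pyIdx?
  rw [if_neg (by omega), if_pos (by omega)]

theorem pvGetD_neg_cons (x : Int) (L : List Int) (i : Int) (d : Int) (h1 : i < 0) (h2 : -(L.length:Int) ≤ i) :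
    PySem.List.pyGetD (x :: L) i d = PySem.List.pyGetD L i d := by
  simp only [PySem.List.pyGetD, PySem.List.pyGet?, List.length_cons]
  rw [pvIdx?_neg _ _ h1 (by push_cast; omega), pvIdx?_neg _ _ h1 h2]
  have h : L.length + 1 - (-i).toNat = (L.length - (-i).toNat) + 1 := by omega
  rw [h]
  simp

theorem pvSetD_neg_cons (x v : Int) (L : List Int) (i : Int) (h1 : i < 0) (h2 : -(L.length:Int) ≤ i) :
    PySem.List.pySetD (x :: L) i v = x :: PySem.List.pySetD L i v := by
  simp only [PySem.List.pySetD, PySem.List.pySet?, List.length_cons]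
  rw [pvIdx?_neg _ _ h1 (by push_cast; omega), pvIdx?_neg _ _ h1 h2]
  have h : L.length + 1 - (-i).toNat = (L.length - (-i).toNat) + 1 := by omega
  rw [h]
  simp

theorem pvLength_pySetD (L : List Int) (i : Int) (v : Int) : (PySem.List.pySetD L i v).length = L.length := by
  simp only [PySem.List.pySetD, PySem.List.pySet?]
  cases PySem.List.pyIdx? L.length i <;> simp

theorem pvSwap_cons (x : Int) (L : List Int) (i j : Int) (h1 : i < 0) (h2 : -(L.length:Int) ≤ i)
    (h3 : j < 0) (h4 : -(L.length:Int) ≤ j) :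
    pvSwap (x :: L) i j = x :: pvSwap L i j := by
  unfold pvSwap
  rw [pvGetD_neg_cons _ _ _ _ h3 h4, pvGetD_neg_cons _ _ _ _ h1 h2,
      pvSetD_neg_cons _ _ _ _ h1 h2, pvSetD_neg_cons _ _ _ _ h3 (by rw [pvLength_pySetD]; exact h4)]

theorem pvSwap_append3 (xs : List Int) (a b c : Int) : pvSwap (xs ++ [a,b,c]) (-3) (-2) = xs ++ [b,a,c] := by
  induction xs with
  | nil =>
      simp [pvSwap, PySem.List.pySetD, PySem.List.pySet?, PySem.List.pyGetD, PySem.List.pyGet?, PySem.List.pyIdx?]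
  | cons x t ih =>
      rw [List.cons_append,
          pvSwap_cons x _ _ _ (by omega)
            (by simp only [List.length_append, List.length_cons, List.length_nil]; push_cast; omega)
            (by omega)
            (by simp only [List.length_append, List.length_cons, List.length_nil]; push_cast; omega),
          ih, List.cons_append]

theorem pvSwap_append4 (xs : List Int) (a b c d : Int) : pvSwap (xs ++ [a,b,c,d]) (-4) (-3) = xs ++ [b,a,c,d] := by
  induction xs with
  | nil =>
      simp [pvSwap, PySem.List.pySetD, PySem.List.pySet?, PySem.List.pyGetD, PySem.List.pyGet?, PySem.List.pyIdx?]
  | cons x t ih =>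
      rw [List.cons_append,
          pvSwap_cons x _ _ _ (by omega)
            (by simp only [List.length_append, List.length_cons, List.length_nil]; push_cast; omega)
            (by omega)
            (by simp only [List.length_append, List.length_cons, List.length_nil]; push_cast; omega),
          ih, List.cons_append]

theorem pvStep_suffix (xs : List Int) (p q i : Int) :
    pvStep (xs ++ [p, q]) i = xs ++ [i, p, q, i] := by
  unfold pvStep
  have h1 : xs ++ [p, q] ++ [i, i] = (xs ++ [p]) ++ [q, i, i] := by simp
  rw [h1, pvSwap_append3, show (xs ++ [p]) ++ [i, q, i] = xs ++ [p, i, q, i] by simp,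
      pvSwap_append4]

theorem pvVal_eq_core (m j : Int) (_h0 : 0 ≤ j) (hj : j < 2 * m - 2) : pvVal m j = pvCore j := by
  unfold pvVal pvCore
  split_ifs <;> first | rfl | omega

theorem pvCore_even (m : Int) (hm : 2 ≤ m) : pvCore (2 * m - 2) = m := by
  unfold pvCore
  rw [if_neg (by omega), if_neg (by omega),
      if_pos (by rw [PySem.Int.mod_eq_emod_of_pos (by omega)]; omega),
      PySem.Int.floordiv_eq_ediv_of_pos (by omega)]
  omega

theorem pvCore_odd (m : Int) (hm : 2 ≤ m) : pvCore (2 * m - 1) = m - 2 := by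
  unfold pvCore
  rw [if_neg (by omega), if_neg (by omega),
      if_neg (by rw [PySem.Int.mod_eq_emod_of_pos (by omega)]; omega),
      PySem.Int.floordiv_eq_ediv_of_pos (by omega)]
  omega

theorem pvRange_pair (a : Int) : PySem.List.pyRange a (a + 2) 1 = [a, a + 1] := by
  rw [PySem.List.pyRange_one_cons (by omega), PySem.List.pyRange_one_cons (by omega),
      PySem.List.pyRange_one_eq_nil (by omega)]

theorem pvAlt_decomp (m : Int) (hm : 2 ≤ m) :
    (PySem.List.pyRange 0 (2 * m) 1).map (pvVal m)
      = (PySem.List.pyRange 0 (2 * m - 2) 1).map pvCore ++ [m - 2, m - 1] := by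
  rw [PySem.List.pyRange_one_append 0 (2 * m - 2) (2 * m) (by omega) (by omega), List.map_append]
  congr 1
  · exact List.map_congr_left (fun j hj => by
      have h := (PySem.List.mem_pyRange_one).mp hj
      exact pvVal_eq_core m j h.1 h.2)
  · rw [PySem.List.pyRange_one_cons (by omega), PySem.List.pyRange_one_cons (by omega),
        PySem.List.pyRange_one_eq_nil (by omega)]
    simp only [List.map_cons, List.map_nil]
    unfold pvVal
    rw [if_neg (by omega), if_neg (by omega), if_pos (by ring)]
    rw [if_neg (by omega), if_neg (by omega), if_neg (by omega), if_pos (by omega)]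

theorem pvA_eq_alt (k : Nat) :
    make_2tree_interval (2 + k) = make_2tree_interval_alt (2 + k) := by
  induction k with
  | zero => decide
  | succ k ih =>
      set m : Int := 2 + (k : Int) with hmdef
      have hm : 2 ≤ m := by omega
      have hcast : (2 : Int) + ((k + 1 : Nat) : Int) = m + 1 := by push_cast; omega
      rw [hcast]
      have hA : make_2tree_interval (m + 1) = pvStep (make_2tree_interval m) m := by
        unfold make_2tree_interval
        rw [if_neg (by omega), if_neg (by omega),
            PySem.List.pyRange_one_succ_right (by omega), List.foldl_append]
        rfl
      have hihm : make_2tree_interval m = make_2tree_interval_alt m := by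
        have : (2 : Int) + (k : Int) = m := by omega
        rw [← this]; exact_mod_cast ih
      rw [hA, hihm]
      unfold make_2tree_interval_alt
      rw [if_neg (by omega), if_neg (by omega), pvAlt_decomp m hm, pvStep_suffix,
          pvAlt_decomp (m + 1) (by omega),
          show (2 * (m + 1) - 2 : Int) = (2 * m - 2) + 2 by ring,
          PySem.List.pyRange_one_append 0 (2 * m - 2) ((2 * m - 2) + 2) (by omega) (by omega),
          List.map_append, pvRange_pair]
      simp only [List.map_cons, List.map_nil]
      rw [pvCore_even m hm, show (2 * m - 2 + 1 : Int) = 2 * m - 1 by ring, pvCore_odd m hm]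
      simp [show (m + 1 - 2 : Int) = m - 1 by ring]

-- ===== VERDICT (by name: the statement is the Claim_ definition above) =====
theorem make_2tree_interval_spec : Claim_equal_make_2tree_interval := by
  intro n _ hpre
  have : n = 2 + ((n - 2).toNat : Int) := by unfold Pre_make_2tree_interval at hpre; omega
  rw [Spec_make_2tree_interval, this]
  exact pvA_eq_alt _
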